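-- pv_equiv track=rewrite | github.com/rubsj/dsa-project-based | python/arrays/inventory-analyzer/core.py | second_highest_stock
-- ===== SOURCE A (Python) =====
-- from typing import List, Optional, Dict
--
-- def second_highest_stock(
--     stock_counts: List[int], product_ids: List[int]
-- ) -> Optional[int]:
--     """
--     Returns the product ID with the second highest stock count.
--     If not enough distinct values exist, returns None.
--     """
--     if not product_ids or len(set(product_ids)) < 2:
--         return None
--     highest = second_highest = float("-inf")
--     highest_id = second_highest_id = None
--     for count, id in zip(stock_counts, product_ids):
--         if count > highest:
--             second_highest, second_highest_id = highest, highest_id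
--             highest, highest_id = count, id
--         elif highest > count > second_highest:
--             second_highest, second_highest_id = count, id
--     return second_highest_id
-- ===== SOURCE B (Python) =====
-- from typing import List, Optional
--
--
-- def second_highest_stock(
--     stock_counts: List[int], product_ids: List[int]
-- ) -> Optional[int]:
--     if not product_ids or len(set(product_ids)) < 2:
--         return None
--     pairs = list(zip(stock_counts, product_ids))
--     counts = {c for c, _ in pairs}
--     if len(counts) < 2:
--         return None
--     top = max(counts)
--     second = max(c for c in counts if c < top)
--     return next(i for c, i in pairs if c == second)
-- ===== Notes on version B (the rewrite author's own statement) =====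
-- stated objective: alternative
-- what changed: Replaces the single-pass two-accumulator (-inf sentinel) scan with explicit passes: compute the maximum count, then the maximum count strictly below it, then return the id of the first pair carrying that second value.
import Mathlib
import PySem

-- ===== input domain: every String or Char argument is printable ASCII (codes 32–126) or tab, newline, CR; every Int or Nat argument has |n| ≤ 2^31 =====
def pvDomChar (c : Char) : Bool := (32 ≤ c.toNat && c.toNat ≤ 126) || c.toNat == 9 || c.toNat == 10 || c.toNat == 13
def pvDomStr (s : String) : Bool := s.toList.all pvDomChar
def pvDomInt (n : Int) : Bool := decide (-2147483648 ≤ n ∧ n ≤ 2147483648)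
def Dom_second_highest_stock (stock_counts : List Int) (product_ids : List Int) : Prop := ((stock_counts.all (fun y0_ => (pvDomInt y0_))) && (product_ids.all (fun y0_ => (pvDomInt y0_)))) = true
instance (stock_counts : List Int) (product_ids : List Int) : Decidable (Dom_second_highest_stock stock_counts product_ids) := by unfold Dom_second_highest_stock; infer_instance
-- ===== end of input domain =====

-- B replaces A's single-pass two-accumulator (-inf sentinel) scan by explicit passes:
-- max count, then max count strictly below it, then id of the first pair with that count.


-- ===== PORT A =====
-- 'count > x' where x is highest/second_highest and none stands for float("-inf")
def shsGtNegInf (c : Int) (x : Option Int) : Bool :=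
  match x with
  | none => true
  | some v => decide (v < c)

-- 'highest > count' (false while highest is still -inf)
def shsTopGt (h : Option Int) (c : Int) : Bool :=
  match h with
  | none => false
  | some v => decide (c < v)

-- loop body; state = (highest, second_highest, highest_id, second_highest_id)
def shsStep (st : Option Int × Option Int × Option Int × Option Int) (ci : Int × Int) :
    Option Int × Option Int × Option Int × Option Int :=
  if shsGtNegInf ci.1 st.1 then (some ci.1, st.1, some ci.2, st.2.2.1)
  else if shsTopGt st.1 ci.1 && shsGtNegInf ci.1 st.2.1 then (st.1, some ci.1, st.2.2.1, some ci.2)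
  else st

def second_highest_stock (stock_counts : List Int) (product_ids : List Int) : Option Int :=
  if product_ids.isEmpty || decide ((PySem.Set.ofList product_ids).length < 2) then none
  else ((stock_counts.zip product_ids).foldl shsStep (none, none, none, none)).2.2.2

-- ===== PORT B =====
def second_highest_stock_alt (stock_counts : List Int) (product_ids : List Int) : Option Int :=
  if product_ids.isEmpty || decide ((PySem.Set.ofList product_ids).length < 2) then none
  else
    let pairs := stock_counts.zip product_ids
    let counts : PySem.Set Int := PySem.Set.ofList (pairs.map Prod.fst)
    if counts.length < 2 then none
    else
      match PySem.List.max? counts (fun x => x) with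
      | none => none          -- unreachable: counts is nonempty here
      | some top =>
        match PySem.List.max? (counts.filter (fun c => decide (c < top))) (fun x => x) with
        | none => none        -- unreachable: the generator is nonempty here
        | some second => (pairs.find? (fun ci => ci.1 == second)).map Prod.snd

-- ===== PRECONDITION & SPEC =====
def Spec_second_highest_stock (stock_counts : List Int) (product_ids : List Int) (out : Option Int) : Prop := out = second_highest_stock_alt stock_counts product_ids
instance (stock_counts : List Int) (product_ids : List Int) (out : Option Int) : Decidable (Spec_second_highest_stock stock_counts product_ids out) := by unfold Spec_second_highest_stock; infer_instance

-- ===== CLAIM (what is proved, stated in full; the proofs are below) =====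
def Claim_equal_second_highest_stock : Prop := ∀ (stock_counts : List Int) (product_ids : List Int), Dom_second_highest_stock stock_counts product_ids → Spec_second_highest_stock stock_counts product_ids (second_highest_stock stock_counts product_ids)

-- ===== LEMMAS AND PROOFS =====

-- closed forms for A's loop state after processing a prefix l
def topC (l : List (Int × Int)) : Option Int := (l.map Prod.fst).max?

def secC (l : List (Int × Int)) : Option Int :=
  match topC l with
  | none => none
  | some t => ((l.map Prod.fst).filter (fun c => decide (c < t))).max?

def topI (l : List (Int × Int)) : Option Int :=
  match topC l with
  | none => none
  | some t => (l.find? (fun p => p.1 == t)).map Prod.snd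

def secI (l : List (Int × Int)) : Option Int :=
  match secC l with
  | none => none
  | some s => (l.find? (fun p => p.1 == s)).map Prod.snd

lemma max?_concat (l : List Int) (c : Int) :
    (l ++ [c]).max? = some (match l.max? with | none => c | some m => max m c) := by
  cases l with
  | nil => simp [List.max?]
  | cons x xs =>
    rw [List.cons_append, List.max?_cons', List.max?_cons']
    simp [List.foldl_append]

lemma max?_bound {l : List Int} {m : Int} (h : l.max? = some m) : ∀ x ∈ l, x ≤ m :=
  fun x hx => (List.max?_le_iff h).mp le_rfl x hx

lemma topC_bound {l : List (Int × Int)} {t : Int} (h : topC l = some t) :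
    ∀ p ∈ l, p.1 ≤ t :=
  fun p hp => max?_bound h p.1 (List.mem_map_of_mem hp)

lemma topC_mem {l : List (Int × Int)} {t : Int} (h : topC l = some t) :
    ∃ p ∈ l, p.1 = t := by
  have := List.max?_mem h
  simpa [List.mem_map] using this

lemma find?_fst_some {l : List (Int × Int)} {t : Int} (h : ∃ p ∈ l, p.1 = t) :
    ∃ r, l.find? (fun p => p.1 == t) = some r := by
  have : (l.find? (fun p => p.1 == t)).isSome := by
    refine List.find?_isSome.mpr ?_
    obtain ⟨p, hp, e⟩ := h
    exact ⟨p, hp, by simp [e]⟩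
  exact Option.isSome_iff_exists.mp this

lemma find?_fst_none {l : List (Int × Int)} {c : Int} (h : ∀ p ∈ l, p.1 ≠ c) :
    l.find? (fun p => p.1 == c) = none :=
  List.find?_eq_none.mpr (fun p hp => by simp [h p hp])

lemma find?_concat_keep {l : List (Int × Int)} (a : Int × Int) {t : Int}
    (h : ∃ p ∈ l, p.1 = t) :
    (l ++ [a]).find? (fun p => p.1 == t) = l.find? (fun p => p.1 == t) := by
  obtain ⟨r, hr⟩ := find?_fst_some h
  rw [List.find?_append, hr]; rfl

lemma find?_concat_new {l : List (Int × Int)} {c : Int} (i : Int)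
    (h : ∀ p ∈ l, p.1 ≠ c) :
    (l ++ [(c, i)]).find? (fun p => p.1 == c) = some (c, i) := by
  rw [List.find?_append, find?_fst_none h]; simp

lemma secC_of_top {l : List (Int × Int)} {t : Int} (h : topC l = some t) :
    secC l = ((l.map Prod.fst).filter (fun c => decide (c < t))).max? := by
  unfold secC; rw [h]

lemma topI_of_top {l : List (Int × Int)} {t : Int} (h : topC l = some t) :
    topI l = (l.find? (fun p => p.1 == t)).map Prod.snd := by
  unfold topI; rw [h]

lemma secI_of_sec {l : List (Int × Int)} {s : Int} (h : secC l = some s) :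
    secI l = (l.find? (fun p => p.1 == s)).map Prod.snd := by
  unfold secI; rw [h]

lemma secI_of_none {l : List (Int × Int)} (h : secC l = none) : secI l = none := by
  unfold secI; rw [h]

lemma state_eq (l : List (Int × Int)) :
    l.foldl shsStep (none, none, none, none) = (topC l, secC l, topI l, secI l) := by
  induction l using List.reverseRecOn with
  | nil => rfl
  | append_singleton l a ih =>
    rw [List.foldl_append, ih]
    obtain ⟨c, i⟩ := a
    simp only [List.foldl_cons, List.foldl_nil]
    cases htl : topC l with
    | none =>
      have hl : l = [] := by
        have := List.max?_eq_none_iff.mp htl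
        exact List.map_eq_nil_iff.mp this
      subst hl
      simp [shsStep, shsGtNegInf, topC, secC, topI, secI, List.max?]
    | some t =>
      have hb := topC_bound htl
      have hmem := topC_mem htl
      have htl' : (l.map Prod.fst).max? = some t := htl
      have hfsplit : (l ++ [(c, i)]).map Prod.fst = l.map Prod.fst ++ [c] := by simp
      have htc : topC (l ++ [(c, i)]) = some (match (l.map Prod.fst).max? with | none => c | some m => max m c) := by
        unfold topC
        rw [hfsplit, max?_concat]
      rw [htl'] at htc
      by_cases h1 : t < c
      · -- count > highest
        have htc' : topC (l ++ [(c, i)]) = some c := by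
          rw [htc]; simp [max_eq_right h1.le]
        have hnone : ∀ p ∈ l, p.1 ≠ c := fun p hp e => absurd (e ▸ hb p hp) (not_le.mpr h1)
        have hsec : secC (l ++ [(c, i)]) = some t := by
          rw [secC_of_top htc', hfsplit, List.filter_append]
          have h2 : (l.map Prod.fst).filter (fun x => decide (x < c)) = l.map Prod.fst := by
            refine List.filter_eq_self.mpr ?_
            intro x hx
            obtain ⟨p, hp, e⟩ := List.mem_map.mp hx
            simpa using lt_of_le_of_lt (e ▸ hb p hp) h1
          rw [h2]
          simp [htl']
        have hti : topI (l ++ [(c, i)]) = some i := by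
          rw [topI_of_top htc', find?_concat_new i hnone]; rfl
        have hsi : secI (l ++ [(c, i)]) = topI l := by
          rw [secI_of_sec hsec, topI_of_top htl, find?_concat_keep _ hmem]
        rw [htc', hsec, hti, hsi]
        simp [shsStep, shsGtNegInf, h1]
      · -- count ≤ highest
        have htc' : topC (l ++ [(c, i)]) = some t := by
          rw [htc]; simp [max_eq_left (not_lt.mp h1)]
        have hti : topI (l ++ [(c, i)]) = topI l := by
          rw [topI_of_top htc', topI_of_top htl, find?_concat_keep _ hmem]
        by_cases h2 : c < t
        · -- highest > count: compare with second
          have hfs : ((l ++ [(c, i)]).map Prod.fst).filter (fun x => decide (x < t))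
              = (l.map Prod.fst).filter (fun x => decide (x < t)) ++ [c] := by
            rw [hfsplit, List.filter_append]
            simp [h2]
          cases hsc : secC l with
          | none =>
            have hfe : (l.map Prod.fst).filter (fun x => decide (x < t)) = [] :=
              List.max?_eq_none_iff.mp (by rw [← secC_of_top htl]; exact hsc)
            have hallt : ∀ p ∈ l, p.1 = t := by
              intro p hp
              by_contra hne
              have hlt : p.1 < t := lt_of_le_of_ne (hb p hp) hne
              have : p.1 ∈ (l.map Prod.fst).filter (fun x => decide (x < t)) :=
                List.mem_filter.mpr ⟨List.mem_map_of_mem hp, by simpa using hlt⟩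
              rw [hfe] at this; exact absurd this (List.not_mem_nil)
            have hsec : secC (l ++ [(c, i)]) = some c := by
              rw [secC_of_top htc', hfs, hfe]
              simp [List.max?]
            have hsi : secI (l ++ [(c, i)]) = some i := by
              rw [secI_of_sec hsec,
                find?_concat_new i (fun p hp e => absurd (e ▸ hallt p hp) (by omega))]
              rfl
            rw [htc', hsec, hti, hsi]
            simp [shsStep, shsGtNegInf, shsTopGt, h1, h2]
          | some s =>
            have hsc' : ((l.map Prod.fst).filter (fun x => decide (x < t))).max? = some s := by
              rw [← secC_of_top htl]; exact hsc
            have hsb : ∀ x ∈ l.map Prod.fst, x < t → x ≤ s := by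
              intro x hx hxt
              exact max?_bound hsc' x (List.mem_filter.mpr ⟨hx, by simpa using hxt⟩)
            have hsec2 : secC (l ++ [(c, i)]) =
                some (match ((l.map Prod.fst).filter (fun x => decide (x < t))).max? with
                      | none => c | some m => max m c) := by
              rw [secC_of_top htc', hfs, max?_concat]
            rw [hsc'] at hsec2
            by_cases h3 : s < c
            · have hsec : secC (l ++ [(c, i)]) = some c := by
                rw [hsec2]; simp [max_eq_right h3.le]
              have hcnone : ∀ p ∈ l, p.1 ≠ c := by
                intro p hp e
                have : p.1 ≤ s := hsb p.1 (List.mem_map_of_mem hp) (e ▸ h2)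
                omega
              have hsi : secI (l ++ [(c, i)]) = some i := by
                rw [secI_of_sec hsec, find?_concat_new i hcnone]; rfl
              rw [htc', hsec, hti, hsi]
              simp [shsStep, shsGtNegInf, shsTopGt, h1, h2, h3]
            · have hsec : secC (l ++ [(c, i)]) = some s := by
                rw [hsec2]; simp [max_eq_left (not_lt.mp h3)]
              have hsmem : ∃ p ∈ l, p.1 = s := by
                have hs := List.max?_mem hsc'
                have := (List.mem_filter.mp hs).1
                simpa [List.mem_map] using this
              have hsi : secI (l ++ [(c, i)]) = secI l := by
                rw [secI_of_sec hsec, secI_of_sec hsc, find?_concat_keep _ hsmem]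
              rw [htc', hsec, hti, hsi]
              simp [shsStep, shsGtNegInf, shsTopGt, h1, h2, h3]
        · -- c = t: nothing changes
          have hct : c = t := le_antisymm (not_lt.mp h1) (not_lt.mp h2)
          have hsec : secC (l ++ [(c, i)]) = secC l := by
            rw [secC_of_top htc', secC_of_top htl, hfsplit, List.filter_append]
            simp [hct]
          have hsi : secI (l ++ [(c, i)]) = secI l := by
            cases hsc : secC l with
            | none => rw [secI_of_none (by rw [hsec, hsc]), secI_of_none hsc]
            | some s =>
              have hsc' : ((l.map Prod.fst).filter (fun x => decide (x < t))).max? = some s := by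
                rw [← secC_of_top htl]; exact hsc
              have hsmem : ∃ p ∈ l, p.1 = s := by
                have hs := List.max?_mem hsc'
                have := (List.mem_filter.mp hs).1
                simpa [List.mem_map] using this
              rw [secI_of_sec (by rw [hsec, hsc]), secI_of_sec hsc, find?_concat_keep _ hsmem]
          rw [htc', hsec, hti, hsi]
          simp [shsStep, shsGtNegInf, shsTopGt, h1, h2]

lemma two_of_nodup {l : List Int} (hn : l.Nodup) (hl : 2 ≤ l.length) (t : Int) :
    ∃ c ∈ l, c ≠ t := by
  match l with
  | a :: b :: rest =>
    have hab : a ≠ b := by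
      have := List.nodup_cons.mp hn
      exact fun e => this.1 (e ▸ List.mem_cons_self)
    by_cases ha : a = t
    · exact ⟨b, by simp, fun e => hab (by rw [ha, e])⟩
    · exact ⟨a, by simp, ha⟩

-- the main bridge: A's closed-form second id equals B's else-branch
lemma secI_eq_alt (pairs : List (Int × Int)) :
    secI pairs =
      (let counts : PySem.Set Int := PySem.Set.ofList (pairs.map Prod.fst)
       if counts.length < 2 then none
       else
         match PySem.List.max? counts (fun x => x) with
         | none => none
         | some top =>
           match PySem.List.max? (counts.filter (fun c => decide (c < top))) (fun x => x) with
           | none => none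
           | some second => (pairs.find? (fun ci => ci.1 == second)).map Prod.snd) := by
  simp only []
  set counts : PySem.Set Int := PySem.Set.ofList (pairs.map Prod.fst) with hcounts
  have hmemc : ∀ x, x ∈ counts ↔ x ∈ pairs.map Prod.fst := fun x =>
    PySem.Set.mem_ofList _ x
  by_cases hlen : counts.length < 2
  · rw [if_pos hlen]
    -- fewer than two distinct counts: A's second accumulator never fills
    cases hco : counts with
    | nil =>
      have : pairs.map Prod.fst = [] := by
        cases hmf : pairs.map Prod.fst with
        | nil => rfl
        | cons x xs =>
          have : x ∈ counts := (hmemc x).mpr (by rw [hmf]; simp)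
          rw [hco] at this; exact absurd this (List.not_mem_nil)
      have hpe : pairs = [] := List.map_eq_nil_iff.mp this
      subst hpe; rfl
    | cons u rest =>
      have hrest : rest = [] := by
        rw [hco] at hlen; simp at hlen; omega
      subst hrest
      have hall : ∀ x ∈ pairs.map Prod.fst, x = u := by
        intro x hx
        have : x ∈ counts := (hmemc x).mpr hx
        rw [hco] at this; simpa using this
      cases htl : topC pairs with
      | none => exact secI_of_none (by unfold secC; rw [htl])
      | some t =>
        have ht : t = u := hall t (List.max?_mem htl)
        have hfe : (pairs.map Prod.fst).filter (fun x => decide (x < t)) = [] := by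
          refine List.filter_eq_nil_iff.mpr ?_
          intro x hx
          have := hall x hx
          simp [this, ht]
        exact secI_of_none (by rw [secC_of_top htl, hfe]; rfl)
  · rw [if_neg hlen]
    have hcne : counts ≠ [] := by
      intro e; rw [e] at hlen; simp at hlen
    cases hmx : PySem.List.max? counts (fun x => x) with
    | none => exact absurd ((PySem.List.max?_eq_none_iff _ _).mp hmx) hcne
    | some tB =>
      have htBmem : tB ∈ pairs.map Prod.fst := (hmemc tB).mp (PySem.List.max?_mem hmx)
      have hmfne : pairs.map Prod.fst ≠ [] := by
        intro e; rw [e] at htBmem; exact absurd htBmem (List.not_mem_nil)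
      cases htl : topC pairs with
      | none => exact absurd (List.max?_eq_none_iff.mp htl) hmfne
      | some t =>
        have htB : tB = t := by
          have h1 : tB ≤ t := max?_bound htl tB htBmem
          have h2 : t ≤ tB :=
            PySem.List.max?_isMax hmx t ((hmemc t).mpr (List.max?_mem htl))
          omega
        subst htB
        -- the strictly-below-top generator is nonempty
        obtain ⟨c₀, hc₀m, hc₀ne⟩ :=
          two_of_nodup (hcounts ▸ PySem.Set.nodup_ofList (pairs.map Prod.fst)) (by omega) tB
        have hc₀lt : c₀ < tB :=
          lt_of_le_of_ne (max?_bound htl c₀ ((hmemc c₀).mp hc₀m)) hc₀ne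
        cases hms : PySem.List.max? (counts.filter (fun c => decide (c < tB))) (fun x => x) with
        | none =>
          have he : counts.filter (fun c => decide (c < tB)) = [] :=
            (PySem.List.max?_eq_none_iff _ _).mp hms
          have : c₀ ∈ ([] : List Int) := he ▸ List.mem_filter.mpr ⟨hc₀m, by simpa using hc₀lt⟩
          exact absurd this (List.not_mem_nil)
        | some sB =>
          have hsBmem := PySem.List.max?_mem hms
          have hsBf := List.mem_filter.mp hsBmem
          have hsBlt : sB < tB := by simpa using hsBf.2
          have hsBl : sB ∈ pairs.map Prod.fst := (hmemc sB).mp hsBf.1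
          have hsec : secC pairs = some sB := by
            rw [secC_of_top htl]
            cases hms2 : ((pairs.map Prod.fst).filter (fun x => decide (x < tB))).max? with
            | none =>
              have he : (pairs.map Prod.fst).filter (fun x => decide (x < tB)) = [] :=
                List.max?_eq_none_iff.mp hms2
              have : sB ∈ ([] : List Int) :=
                he ▸ List.mem_filter.mpr ⟨hsBl, by simpa using hsBlt⟩
              exact absurd this (List.not_mem_nil)
            | some s =>
              have hsf := List.mem_filter.mp (List.max?_mem hms2)
              have h1 : s ≤ sB :=
                PySem.List.max?_isMax hms s
                  (List.mem_filter.mpr ⟨(hmemc s).mpr hsf.1, hsf.2⟩)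
              have h2 : sB ≤ s :=
                max?_bound hms2 sB (List.mem_filter.mpr ⟨hsBl, by simpa using hsBlt⟩)
              exact congrArg some (le_antisymm h1 h2)
          rw [secI_of_sec hsec]
          simp only [hms]

-- ===== VERDICT (by name: the statement is the Claim_ definition above) =====
theorem second_highest_stock_spec : Claim_equal_second_highest_stock := by
  intro sc pi _
  unfold Spec_second_highest_stock second_highest_stock second_highest_stock_alt
  by_cases hg : (pi.isEmpty || decide ((PySem.Set.ofList pi).length < 2)) = true
  · rw [if_pos hg, if_pos hg]
  · rw [if_neg hg, if_neg hg]
    rw [state_eq]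
    exact secI_eq_alt (sc.zip pi)
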